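-- pv_equiv track=rewrite | github.com/devng/code-puzzles | src/devng/codejam2018/sol_1b_2.py | solve
-- ===== SOURCE A (Python) =====
-- def get_run(S, start, N, M):
--     n = N[start]
--     i = start
--     while i < S and N[i] == n:
--         i += 1
--     skip = i - start
--     if i == S:
--         return skip, i - start
--     m = M[i]
--     i += 1
--     while i < S and (M[i] == m or N[i] == n):
--         i += 1
--     return skip, i - start
--
-- def solve(S, N, M):
--     start = 0
--     best_run = 0
--     count = 0
--     next_n = 0
--     next_m = 0
--     while start < S:
--         if S - start < best_run:
--             break
--
--         n_run = 0
--         if start >= next_n: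
--             n_skip, n_run = get_run(S, start, N, M)
--             next_n = start + n_skip
--
--         # swap the N and M arrays
--         m_run = 0
--         if start >= next_m:
--             m_skip, m_run = get_run(S, start, M, N)
--             next_m = start + m_skip
--
--         size = max(n_run, m_run)
--         if size > best_run:
--             best_run = size
--             count = 1
--         elif size == best_run:
--             count += 1
--         start += 1
--
--     return best_run, count
-- ===== SOURCE B (Python) =====
-- def solve(S, N, M):
--     if S <= 0:
--         return 0, 0
--     # one backward pass: endN[i] / endM[i] = exclusive end of the constant block containing i
--     endN = [S]
--     endM = [S]
--     for i in range(S - 2, -1, -1):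
--         endN.append(endN[-1] if N[i] == N[i + 1] else i + 1)
--         endM.append(endM[-1] if M[i] == M[i + 1] else i + 1)
--     endN.reverse()
--     endM.reverse()
--
--     def walk(i, X, Y, endX, endY):
--         # run length from block start i of X: jump whole blocks via the end arrays
--         x = X[i]
--         p = endX[i]
--         if p == S:
--             return S - i
--         y = Y[p]
--         p += 1
--         while p < S:
--             if Y[p] == y:
--                 p = endY[p]
--             elif X[p] == x:
--                 p = endX[p]
--             else:
--                 break
--         return p - i
--
--     starts = [i for i in range(S)
--               if i == 0 or N[i] != N[i - 1] or M[i] != M[i - 1]]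
--     best, count = 0, 0
--     for i in starts:
--         n_run = walk(i, N, M, endN, endM) if i == 0 or N[i] != N[i - 1] else 0
--         m_run = walk(i, M, N, endM, endN) if i == 0 or M[i] != M[i - 1] else 0
--         size = n_run if n_run >= m_run else m_run
--         if size > best:
--             best, count = size, 1
--         elif size == best:
--             count += 1
--     return best, count
-- ===== Notes on version B (the rewrite author's own statement) =====
-- stated objective: alternative
-- what changed: B precomputes block-end arrays for N and M in one backward pass, finds each run length by jumping whole constant blocks through those arrays instead of A's element-by-element scans, evaluates runs only at the block-start positions it collects up front (A's next_n/next_m caches and early break disappear), and aggregates best/count over that start list.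
-- outside the precondition, e.g. on solve(3, [1, 2], [5, 5, 5]): A returns (3, 1), B raises IndexError
import Mathlib
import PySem

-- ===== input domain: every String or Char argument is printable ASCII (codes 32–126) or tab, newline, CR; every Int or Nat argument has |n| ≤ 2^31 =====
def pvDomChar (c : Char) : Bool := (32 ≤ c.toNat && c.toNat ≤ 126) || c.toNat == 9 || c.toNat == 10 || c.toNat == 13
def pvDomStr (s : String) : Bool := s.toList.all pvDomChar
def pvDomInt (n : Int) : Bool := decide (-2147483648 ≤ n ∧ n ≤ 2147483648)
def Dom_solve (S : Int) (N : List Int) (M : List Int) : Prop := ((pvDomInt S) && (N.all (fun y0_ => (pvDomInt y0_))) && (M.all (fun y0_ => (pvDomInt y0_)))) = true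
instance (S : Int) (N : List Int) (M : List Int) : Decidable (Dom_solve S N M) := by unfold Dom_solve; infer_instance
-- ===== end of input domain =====

-- B replaces A's per-element scans and caches by precomputed block-end arrays (one backward pass),
-- run lengths found by jumping whole blocks, evaluated only at block starts (alternative, same worst-case cost).


-- ===== PORT A =====
-- first while of get_run: advance while i < S and N[i] == n (indexing is pyGetD _ _ 0,
-- exact under Pre_solve where every accessed index is in range)
def whileEqA (S : Int) (N : List Int) (n : Int) (i : Int) : Int :=
  if h : i < S then
    if PySem.List.pyGetD N i 0 = n then whileEqA S N n (i + 1) else i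
  else i
termination_by (S - i).toNat
decreasing_by omega

-- second while of get_run: advance while i < S and (M[i] == m or N[i] == n)
def whileOrA (S : Int) (N M : List Int) (n m : Int) (i : Int) : Int :=
  if h : i < S then
    if PySem.List.pyGetD M i 0 = m ∨ PySem.List.pyGetD N i 0 = n then whileOrA S N M n m (i + 1) else i
  else i
termination_by (S - i).toNat
decreasing_by omega

def getRunA (S : Int) (start : Int) (N M : List Int) : Int × Int :=
  let n := PySem.List.pyGetD N start 0
  let i := whileEqA S N n start
  let skip := i - start
  if i = S then (skip, i - start)
  else
    let m := PySem.List.pyGetD M i 0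
    let i2 := whileOrA S N M n m (i + 1)
    (skip, i2 - start)

-- the while loop of solve; state = (start, best_run, count, next_n, next_m)
def loopA (S : Int) (N M : List Int) (start best count next_n next_m : Int) : Int × Int :=
  if h : start < S then
    if S - start < best then (best, count)
    else
      let p := if next_n ≤ start then
                 let r := getRunA S start N M; (start + r.1, r.2)
               else (next_n, 0)
      let q := if next_m ≤ start then
                 let r := getRunA S start M N; (start + r.1, r.2)
               else (next_m, 0)
      let size := max p.2 q.2
      if best < size then loopA S N M (start + 1) size 1 p.1 q.1
      else if size = best then loopA S N M (start + 1) best (count + 1) p.1 q.1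
      else loopA S N M (start + 1) best count p.1 q.1
  else (best, count)
termination_by (S - start).toNat
decreasing_by all_goals omega

def solve (S : Int) (N : List Int) (M : List Int) : Int × Int :=
  loopA S N M 0 0 0 0 0

-- ===== PORT B =====
-- Source B's backward append-then-reverse loop building the block-end array (end[i] = exclusive end of
-- the constant block containing i), written as the equivalent front-cons recursion: the recursion
-- index runs S-2 … 0 like Python's range(S-2,-1,-1), acc holds the entries for indices i..S-1,
-- Python's endX[-1] is the head of acc, and consing replaces append+final reverse.
def buildEnds (S : Int) (X : List Int) (i : Int) : List Int :=
  if h : 0 ≤ i ∧ i ≤ S - 2 then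
    (if PySem.List.pyGetD X i 0 = PySem.List.pyGetD X (i + 1) 0
     then (buildEnds S X (i + 1)).headD 0 else i + 1) :: buildEnds S X (i + 1)
  else [S]
termination_by (S - 1 - i).toNat
decreasing_by omega

-- the while loop of walk; fuel-counted recursion (fuel S.toNat + 1): with the end arrays B builds,
-- every iteration moves p strictly forward (proved in jump_eq below), so the fuel is never exhausted
-- on the calls solve_alt makes and the recursion is exactly Python's loop there.
def jump (S : Int) (X Y endX endY : List Int) (x y : Int) : Nat → Int → Int
  | 0, p => p
  | Nat.succ fuel, p =>
    if p < S then
      if PySem.List.pyGetD Y p 0 = y then jump S X Y endX endY x y fuel (PySem.List.pyGetD endY p 0)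
      else if PySem.List.pyGetD X p 0 = x then jump S X Y endX endY x y fuel (PySem.List.pyGetD endX p 0)
      else p
    else p

-- Source B's walk: run length from block start i of X, jumping whole blocks via the end arrays
def walkB (S : Int) (X Y endX endY : List Int) (i : Int) : Int :=
  let x := PySem.List.pyGetD X i 0
  let p := PySem.List.pyGetD endX i 0
  if p = S then S - i
  else jump S X Y endX endY x (PySem.List.pyGetD Y p 0) (S.toNat + 1) (p + 1) - i

def solve_alt (S : Int) (N : List Int) (M : List Int) : Int × Int :=
  if S ≤ 0 then (0, 0) else
  let endN := buildEnds S N 0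
  let endM := buildEnds S M 0
  let starts := (PySem.List.pyRange 0 S 1).filter
    (fun i => decide (i = 0 ∨ PySem.List.pyGetD N i 0 ≠ PySem.List.pyGetD N (i - 1) 0
                            ∨ PySem.List.pyGetD M i 0 ≠ PySem.List.pyGetD M (i - 1) 0))
  starts.foldl (fun bc i =>
    let n_run := if i = 0 ∨ PySem.List.pyGetD N i 0 ≠ PySem.List.pyGetD N (i - 1) 0
                 then walkB S N M endN endM i else 0
    let m_run := if i = 0 ∨ PySem.List.pyGetD M i 0 ≠ PySem.List.pyGetD M (i - 1) 0
                 then walkB S M N endM endN i else 0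
    let size := if m_run ≤ n_run then n_run else m_run
    if bc.1 < size then (size, 1) else if size = bc.1 then (bc.1, bc.2 + 1) else bc) (0, 0)

-- ===== PRECONDITION & SPEC =====
-- Pre_ excludes inputs where S exceeds a list length: there A raises IndexError on almost all of them
-- and returns only accidentally when its scans happen to stop before the out-of-range tail (see cites).
def Pre_solve (S : Int) (N : List Int) (M : List Int) : Prop :=
  S ≤ (N.length : Int) ∧ S ≤ (M.length : Int)
instance (S : Int) (N : List Int) (M : List Int) : Decidable (Pre_solve S N M) := by unfold Pre_solve; infer_instance

def pvWitness_solve : Int × List Int × List Int := (3, ([1, 1, 2], [5, 6, 6]))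

def Spec_solve (S : Int) (N : List Int) (M : List Int) (out : Int × Int) : Prop := out = solve_alt S N M
instance (S : Int) (N : List Int) (M : List Int) (out : Int × Int) : Decidable (Spec_solve S N M out) := by unfold Spec_solve; infer_instance

-- ===== CLAIM (what is proved, stated in full; the proofs are below) =====
def Claim_equal_solve : Prop := ∀ (S : Int) (N : List Int) (M : List Int), Dom_solve S N M → Pre_solve S N M → Spec_solve S N M (solve S N M)

-- ===== LEMMAS AND PROOFS =====

-- the aggregation step both loops perform on (best, count)
def stepA (p : Int × Int) (x : Int) : Int × Int :=
  if p.1 < x then (x, 1) else if x = p.1 then (p.1, p.2 + 1) else p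

-- block-start predicate (as a Bool), the condition both programs test
def isStart (N : List Int) (i : Int) : Bool :=
  i == 0 || !(PySem.List.pyGetD N i 0 == PySem.List.pyGetD N (i - 1) 0)

theorem isStart_true_iff (N : List Int) (i : Int) :
    isStart N i = true ↔ (i = 0 ∨ PySem.List.pyGetD N i 0 ≠ PySem.List.pyGetD N (i - 1) 0) := by
  simp [isStart]

-- the per-position run size, the common semantic object of the two proofs
def sizeSem (S : Int) (N M : List Int) (i : Int) : Int :=
  max (if isStart N i then (getRunA S i N M).2 else 0)
      (if isStart M i then (getRunA S i M N).2 else 0)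

theorem whileEqA_ge (S : Int) (N : List Int) (n i : Int) : i ≤ whileEqA S N n i := by
  rw [whileEqA]
  split
  · split
    · have := whileEqA_ge S N n (i + 1); omega
    · omega
  · omega
termination_by (S - i).toNat
decreasing_by omega

theorem whileEqA_le (S : Int) (N : List Int) (n i : Int) (h : i ≤ S) : whileEqA S N n i ≤ S := by
  rw [whileEqA]
  split
  · split
    · exact whileEqA_le S N n (i + 1) (by omega)
    · omega
  · omega
termination_by (S - i).toNat
decreasing_by omega

theorem whileEqA_block (S : Int) (N : List Int) (n i : Int) :
    ∀ k, i ≤ k → k < whileEqA S N n i → PySem.List.pyGetD N k 0 = n := by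
  intro k hik hk
  rw [whileEqA] at hk
  split at hk
  · split at hk
    · rcases eq_or_lt_of_le hik with rfl | hlt
      · assumption
      · exact whileEqA_block S N n (i + 1) k (by omega) hk
    · omega
  · omega
termination_by (S - i).toNat
decreasing_by omega

theorem whileEqA_exit (S : Int) (N : List Int) (n i : Int) :
    whileEqA S N n i < S → PySem.List.pyGetD N (whileEqA S N n i) 0 ≠ n := by
  rw [whileEqA]
  split
  · split
    · exact whileEqA_exit S N n (i + 1)
    · intro _ hc; exact absurd hc (by assumption)
  · intro h; omega
termination_by (S - i).toNat
decreasing_by omega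

theorem whileEqA_progress (S : Int) (N : List Int) (i : Int) (h : i < S) :
    i < whileEqA S N (PySem.List.pyGetD N i 0) i := by
  rw [whileEqA, dif_pos h, if_pos rfl]
  have := whileEqA_ge S N (PySem.List.pyGetD N i 0) (i + 1); omega

theorem whileOrA_ge (S : Int) (N M : List Int) (n m i : Int) : i ≤ whileOrA S N M n m i := by
  rw [whileOrA]
  split
  · split
    · have := whileOrA_ge S N M n m (i + 1); omega
    · omega
  · omega
termination_by (S - i).toNat
decreasing_by omega

theorem whileOrA_le (S : Int) (N M : List Int) (n m i : Int) (h : i ≤ S) :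
    whileOrA S N M n m i ≤ S := by
  rw [whileOrA]
  split
  · split
    · exact whileOrA_le S N M n m (i + 1) (by omega)
    · omega
  · omega
termination_by (S - i).toNat
decreasing_by omega

theorem getRunA_fst (S start : Int) (N M : List Int) :
    (getRunA S start N M).1 = whileEqA S N (PySem.List.pyGetD N start 0) start - start := by
  simp only [getRunA]; split <;> rfl

theorem getRunA_run_le (S start : Int) (N M : List Int) (h : start < S) :
    (getRunA S start N M).2 ≤ S - start := by
  simp only [getRunA]
  have hle : whileEqA S N (PySem.List.pyGetD N start 0) start ≤ S :=
    whileEqA_le S N _ start (by omega)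
  split
  · dsimp only []; omega
  · have h2 := whileOrA_le S N M (PySem.List.pyGetD N start 0)
      (PySem.List.pyGetD M (whileEqA S N (PySem.List.pyGetD N start 0) start) 0)
      (whileEqA S N (PySem.List.pyGetD N start 0) start + 1) (by omega)
    dsimp only []; omega

theorem getRunA_pos (S start : Int) (N M : List Int) (h : start < S) :
    1 ≤ (getRunA S start N M).2 := by
  simp only [getRunA]
  have hprog := whileEqA_progress S N start h
  split
  · dsimp only []; omega
  · have h2 := whileOrA_ge S N M (PySem.List.pyGetD N start 0)
      (PySem.List.pyGetD M (whileEqA S N (PySem.List.pyGetD N start 0) start) 0)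
      (whileEqA S N (PySem.List.pyGetD N start 0) start + 1)
    dsimp only []; omega

theorem sizeSem_le (S : Int) (N M : List Int) (i : Int) (h : i < S) : sizeSem S N M i ≤ S - i := by
  unfold sizeSem
  have h1 := getRunA_run_le S i N M h
  have h2 := getRunA_run_le S i M N h
  split <;> split <;> omega

theorem sizeSem_pos (S : Int) (N M : List Int) (i : Int) (h : i < S)
    (hs : isStart N i = true ∨ isStart M i = true) : 1 ≤ sizeSem S N M i := by
  unfold sizeSem
  have h1 := getRunA_pos S i N M h
  have h2 := getRunA_pos S i M N h
  rcases hs with hs | hs <;> rw [hs] <;> simp <;> omega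

theorem sizeSem_zero (S : Int) (N M : List Int) (i : Int)
    (hN : isStart N i = false) (hM : isStart M i = false) : sizeSem S N M i = 0 := by
  unfold sizeSem
  rw [hN, hM]
  simp

-- A's cache invariant: next_n is at or beyond start, no block start lies strictly between,
-- and (if still in range) next_n itself is a block start
def CacheInv (S : Int) (N : List Int) (nx start : Int) : Prop :=
  start ≤ nx ∧ (∀ j, start ≤ j → j < nx → isStart N j = false) ∧ (nx < S → isStart N nx = true)

-- one side of A's loop body produces the semantic per-position value and preserves the invariant
theorem side_step (S : Int) (N M : List Int) (start nx : Int)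
    (h0 : 0 ≤ start) (hS : start < S) (hI : CacheInv S N nx start) :
    (if nx ≤ start then
       let r := getRunA S start N M; ((start + r.1, r.2) : Int × Int)
     else (nx, 0)).2
      = (if isStart N start then (getRunA S start N M).2 else 0) ∧
    CacheInv S N (if nx ≤ start then
               let r := getRunA S start N M; ((start + r.1, r.2) : Int × Int)
             else (nx, 0)).1 (start + 1) := by
  obtain ⟨h1, h2, h3⟩ := hI
  by_cases hnx : nx ≤ start
  · have hxe : start = nx := le_antisymm h1 hnx
    subst hxe
    have hstart : isStart N start = true := h3 hS
    rw [if_pos le_rfl]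
    have hfst := getRunA_fst S start N M
    have hprog := whileEqA_progress S N start hS
    have hble := whileEqA_block S N (PySem.List.pyGetD N start 0) start
    have hexit := whileEqA_exit S N (PySem.List.pyGetD N start 0) start
    constructor
    · rw [if_pos hstart]
    · refine ⟨by dsimp only []; omega, ?_, ?_⟩
      · intro j hj1 hj2
        dsimp only [] at hj2
        rw [hfst] at hj2
        rw [← Bool.not_eq_true, isStart_true_iff]
        intro hjs
        rcases hjs with rfl | hne
        · omega
        · exact hne (by
            rw [hble j (by omega) (by omega), hble (j - 1) (by omega) (by omega)])
      · intro hlt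
        dsimp only [] at hlt ⊢
        rw [hfst] at hlt ⊢
        have hend : start + (whileEqA S N (PySem.List.pyGetD N start 0) start - start)
            = whileEqA S N (PySem.List.pyGetD N start 0) start := by omega
        rw [hend] at hlt ⊢
        rw [isStart_true_iff]
        right
        rw [hble (whileEqA S N (PySem.List.pyGetD N start 0) start - 1) (by omega) (by omega)]
        exact whileEqA_exit S N (PySem.List.pyGetD N start 0) start hlt
  · rw [if_neg hnx]
    constructor
    · have hns : isStart N start = false := h2 start le_rfl (by omega)
      rw [if_neg (by simp [hns])]
    · exact ⟨by omega, fun j hj1 hj2 => h2 j (by omega) hj2, h3⟩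

theorem foldl_stepA_const (l : List Int) (b c : Int) (h : ∀ x ∈ l, x < b) :
    l.foldl stepA (b, c) = (b, c) := by
  cases l with
  | nil => rfl
  | cons x t =>
    have hx : x < b := h x (by simp)
    rw [List.foldl_cons, show stepA (b, c) x = (b, c) by
      unfold stepA; rw [if_neg (by simp; omega), if_neg (by omega)]]
    exact foldl_stepA_const t b c (fun y hy => h y (by simp [hy]))

theorem loopA_eq (S : Int) (N M : List Int) (start best count nn nm : Int)
    (h0 : 0 ≤ start) (hA : CacheInv S N nn start) (hB : CacheInv S M nm start) :
    loopA S N M start best count nn nm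
      = ((PySem.List.pyRange start S 1).map (sizeSem S N M)).foldl stepA (best, count) := by
  rw [loopA]
  split
  · rename_i hS
    split
    · rename_i hbreak
      symm
      apply foldl_stepA_const
      intro x hx
      simp only [List.mem_map] at hx
      obtain ⟨j, hj, rfl⟩ := hx
      rw [PySem.List.mem_pyRange_one] at hj
      have := sizeSem_le S N M j hj.2
      omega
    · rename_i hbr
      have sN := side_step S N M start nn h0 hS hA
      have sM := side_step S M N start nm h0 hS hB
      rw [PySem.List.pyRange_one_cons hS, List.map_cons, List.foldl_cons]
      dsimp only [] at sN sM ⊢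
      rw [sN.1, sM.1]
      rw [show max (if isStart N start then (getRunA S start N M).2 else 0)
              (if isStart M start then (getRunA S start M N).2 else 0) = sizeSem S N M start from rfl]
      rw [show stepA (best, count) (sizeSem S N M start)
            = if best < sizeSem S N M start then (sizeSem S N M start, 1)
              else if sizeSem S N M start = best then (best, count + 1) else (best, count) from rfl]
      by_cases hc1 : best < sizeSem S N M start
      · rw [if_pos hc1, if_pos hc1]
        exact loopA_eq S N M (start + 1) _ 1 _ _ (by omega) sN.2 sM.2
      · rw [if_neg hc1, if_neg hc1]
        by_cases hc2 : sizeSem S N M start = best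
        · rw [if_pos hc2, if_pos hc2]
          exact loopA_eq S N M (start + 1) _ (count + 1) _ _ (by omega) sN.2 sM.2
        · rw [if_neg hc2, if_neg hc2]
          exact loopA_eq S N M (start + 1) _ count _ _ (by omega) sN.2 sM.2
  · rename_i hS
    rw [PySem.List.pyRange_one_eq_nil (by omega), List.map_nil, List.foldl_nil]
termination_by (S - start).toNat
decreasing_by all_goals omega

-- ---- B-side lemmas ----

theorem buildEnds_ne_nil (S : Int) (X : List Int) (i : Int) : buildEnds S X i ≠ [] := by
  rw [buildEnds]; split <;> simp

-- the entry of the end array for index k (stored at offset k - i) is the exit point of A's first while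
theorem buildEnds_get (S : Int) (X : List Int) (i : Int) :
    ∀ k, 0 ≤ i → i ≤ k → k < S →
      PySem.List.pyGetD (buildEnds S X i) (k - i) 0 = whileEqA S X (PySem.List.pyGetD X k 0) k := by
  intro k h0 hik hkS
  rw [buildEnds]
  split
  · rename_i hcond
    rcases eq_or_lt_of_le hik with rfl | hlt
    · rw [show i - i = ((0 : Nat) : Int) from by omega, PySem.List.pyGetD_natCast]
      simp only [List.getD_cons_zero]
      rw [whileEqA, dif_pos hkS, if_pos rfl]
      by_cases he : PySem.List.pyGetD X i 0 = PySem.List.pyGetD X (i + 1) 0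
      · rw [if_pos he]
        have hh := buildEnds_get S X (i + 1) (i + 1) (by omega) le_rfl (by omega)
        rw [show i + 1 - (i + 1) = ((0 : Nat) : Int) from by omega, PySem.List.pyGetD_natCast] at hh
        cases hb : buildEnds S X (i + 1) with
        | nil => exact absurd hb (buildEnds_ne_nil S X (i + 1))
        | cons a t =>
          rw [hb] at hh
          simp only [List.getD_cons_zero] at hh
          simp only [List.headD_cons]
          rw [hh, he]
      · rw [if_neg he]
        rw [whileEqA, dif_pos (by omega), if_neg (fun hc => he hc.symm)]
    · -- k > i : step into the tail
      have hstep : k - i = (((k - i - 1).toNat + 1 : Nat) : Int) := by omega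
      rw [hstep, PySem.List.pyGetD_natCast, List.getD_cons_succ]
      have hh := buildEnds_get S X (i + 1) k (by omega) (by omega) hkS
      rw [show k - (i + 1) = (((k - i - 1).toNat : Nat) : Int) from by omega,
        PySem.List.pyGetD_natCast] at hh
      exact hh
  · rename_i hcond
    have hkeq : k = i := by omega
    subst hkeq
    rw [show k - k = ((0 : Nat) : Int) from by omega, PySem.List.pyGetD_natCast]
    simp only [List.getD_cons_zero]
    rw [whileEqA, dif_pos hkS, if_pos rfl, whileEqA, dif_neg (by omega)]
    omega
termination_by (S - 1 - i).toNat
decreasing_by all_goals omega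

theorem buildEnds_get0 (S : Int) (X : List Int) (p : Int) (h0 : 0 ≤ p) (hS : p < S) :
    PySem.List.pyGetD (buildEnds S X 0) p 0 = whileEqA S X (PySem.List.pyGetD X p 0) p := by
  have := buildEnds_get S X 0 p le_rfl h0 hS
  rwa [sub_zero] at this

-- whileOrA skips over any interval on which its condition holds
theorem whileOrA_skip (S : Int) (X Y : List Int) (x y : Int) (p q : Int)
    (hpq : p ≤ q) (hqS : q ≤ S)
    (hc : ∀ k, p ≤ k → k < q → (PySem.List.pyGetD Y k 0 = y ∨ PySem.List.pyGetD X k 0 = x)) :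
    whileOrA S X Y x y p = whileOrA S X Y x y q := by
  rcases eq_or_lt_of_le hpq with rfl | hlt
  · rfl
  · rw [whileOrA, dif_pos (by omega), if_pos (hc p le_rfl hlt)]
    exact whileOrA_skip S X Y x y (p + 1) q (by omega) hqS (fun k hk1 hk2 => hc k (by omega) hk2)
termination_by (q - p).toNat
decreasing_by omega

-- with the canonical end arrays and enough fuel, jump is exactly A's second while
theorem jump_eq (S : Int) (X Y : List Int) (x y : Int) :
    ∀ fuel p, 0 ≤ p → (S - p).toNat < fuel →
      jump S X Y (buildEnds S X 0) (buildEnds S Y 0) x y fuel p = whileOrA S X Y x y p := by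
  intro fuel
  induction fuel with
  | zero => intro p _ h; omega
  | succ f ih =>
    intro p hp hf
    rw [jump]
    by_cases hpS : p < S
    · rw [if_pos hpS]
      by_cases hY : PySem.List.pyGetD Y p 0 = y
      · rw [if_pos hY, buildEnds_get0 S Y p hp hpS]
        set q := whileEqA S Y (PySem.List.pyGetD Y p 0) p with hq
        have hprog := whileEqA_progress S Y p hpS
        have hqle := whileEqA_le S Y (PySem.List.pyGetD Y p 0) p (by omega)
        rw [ih q (by omega) (by omega)]
        exact (whileOrA_skip S X Y x y p q (by omega) hqle
          (fun k hk1 hk2 => Or.inl (by rw [whileEqA_block S Y _ p k hk1 hk2, hY]))).symm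
      · rw [if_neg hY]
        by_cases hX : PySem.List.pyGetD X p 0 = x
        · rw [if_pos hX, buildEnds_get0 S X p hp hpS]
          set q := whileEqA S X (PySem.List.pyGetD X p 0) p with hq
          have hprog := whileEqA_progress S X p hpS
          have hqle := whileEqA_le S X (PySem.List.pyGetD X p 0) p (by omega)
          rw [ih q (by omega) (by omega)]
          exact (whileOrA_skip S X Y x y p q (by omega) hqle
            (fun k hk1 hk2 => Or.inr (by rw [whileEqA_block S X _ p k hk1 hk2, hX]))).symm
        · rw [if_neg hX, whileOrA, dif_pos hpS, if_neg (by tauto)]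
    · rw [if_neg hpS, whileOrA, dif_neg hpS]

-- walk with the canonical end arrays computes get_run's run length
theorem walkB_eq (S : Int) (X Y : List Int) (i : Int) (h0 : 0 ≤ i) (hS : i < S) :
    walkB S X Y (buildEnds S X 0) (buildEnds S Y 0) i = (getRunA S i X Y).2 := by
  unfold walkB getRunA
  rw [buildEnds_get0 S X i h0 hS]
  set j := whileEqA S X (PySem.List.pyGetD X i 0) i with hj
  have hprog := whileEqA_progress S X i hS
  have hjle := whileEqA_le S X (PySem.List.pyGetD X i 0) i (by omega)
  by_cases hjS : j = S
  · rw [if_pos hjS, if_pos hjS]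
    dsimp only []
    omega
  · rw [if_neg hjS, if_neg hjS]
    dsimp only []
    rw [jump_eq S X Y (PySem.List.pyGetD X i 0) (PySem.List.pyGetD Y j 0) (S.toNat + 1) (j + 1)
      (by omega) (by omega)]

-- B's fold body over in-range indices is stepA of the semantic size
theorem bfold_eq (S : Int) (N M : List Int) :
    ∀ (l : List Int), (∀ i ∈ l, 0 ≤ i ∧ i < S) → ∀ (bc : Int × Int),
      l.foldl (fun bc i =>
        let n_run := if i = 0 ∨ PySem.List.pyGetD N i 0 ≠ PySem.List.pyGetD N (i - 1) 0
                     then walkB S N M (buildEnds S N 0) (buildEnds S M 0) i else 0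
        let m_run := if i = 0 ∨ PySem.List.pyGetD M i 0 ≠ PySem.List.pyGetD M (i - 1) 0
                     then walkB S M N (buildEnds S M 0) (buildEnds S N 0) i else 0
        let size := if m_run ≤ n_run then n_run else m_run
        if bc.1 < size then (size, 1) else if size = bc.1 then (bc.1, bc.2 + 1) else bc) bc
      = (l.map (sizeSem S N M)).foldl stepA bc := by
  intro l
  induction l with
  | nil => intro _ _; rfl
  | cons i t ih =>
    intro hmem bc
    obtain ⟨h0, hS⟩ := hmem i (List.mem_cons_self ..)
    have htail : ∀ j ∈ t, 0 ≤ j ∧ j < S := fun j hj => hmem j (List.mem_cons_of_mem i hj)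
    rw [List.map_cons, List.foldl_cons, List.foldl_cons]
    have e1 : (if i = 0 ∨ PySem.List.pyGetD N i 0 ≠ PySem.List.pyGetD N (i - 1) 0
               then walkB S N M (buildEnds S N 0) (buildEnds S M 0) i else 0)
            = (if isStart N i then (getRunA S i N M).2 else 0) := by
      by_cases hc : i = 0 ∨ PySem.List.pyGetD N i 0 ≠ PySem.List.pyGetD N (i - 1) 0
      · rw [if_pos hc, if_pos ((isStart_true_iff N i).mpr hc), walkB_eq S N M i h0 hS]
      · rw [if_neg hc, if_neg (by rw [isStart_true_iff]; exact hc)]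
    have e2 : (if i = 0 ∨ PySem.List.pyGetD M i 0 ≠ PySem.List.pyGetD M (i - 1) 0
               then walkB S M N (buildEnds S M 0) (buildEnds S N 0) i else 0)
            = (if isStart M i then (getRunA S i M N).2 else 0) := by
      by_cases hc : i = 0 ∨ PySem.List.pyGetD M i 0 ≠ PySem.List.pyGetD M (i - 1) 0
      · rw [if_pos hc, if_pos ((isStart_true_iff M i).mpr hc), walkB_eq S M N i h0 hS]
      · rw [if_neg hc, if_neg (by rw [isStart_true_iff]; exact hc)]
    have hbody :
        (let n_run := if i = 0 ∨ PySem.List.pyGetD N i 0 ≠ PySem.List.pyGetD N (i - 1) 0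
                      then walkB S N M (buildEnds S N 0) (buildEnds S M 0) i else 0
         let m_run := if i = 0 ∨ PySem.List.pyGetD M i 0 ≠ PySem.List.pyGetD M (i - 1) 0
                      then walkB S M N (buildEnds S M 0) (buildEnds S N 0) i else 0
         let size := if m_run ≤ n_run then n_run else m_run
         if bc.1 < size then (size, 1) else if size = bc.1 then (bc.1, bc.2 + 1) else bc)
        = stepA bc (sizeSem S N M i) := by
      simp only [e1, e2]
      have emax : (if (if isStart M i then (getRunA S i M N).2 else 0)
                      ≤ (if isStart N i then (getRunA S i N M).2 else 0)
                   then (if isStart N i then (getRunA S i N M).2 else 0)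
                   else (if isStart M i then (getRunA S i M N).2 else 0)) = sizeSem S N M i := by
        unfold sizeSem
        rcases le_total (if isStart M i then (getRunA S i M N).2 else 0)
          (if isStart N i then (getRunA S i N M).2 else 0) with hle | hle
        · rw [if_pos hle, max_eq_left hle]
        · rcases eq_or_lt_of_le hle with heq | hlt
          · rw [heq]; simp
          · rw [if_neg (by omega), max_eq_right hle]
      rw [emax]
      rfl
    rw [hbody,
      show stepA bc (sizeSem S N M i)
          = if bc.1 < sizeSem S N M i then (sizeSem S N M i, 1)
            else if sizeSem S N M i = bc.1 then (bc.1, bc.2 + 1) else bc from rfl]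
    exact ih htail _

-- dropping the non-start positions (whose size is 0) from the full size list
theorem filter_starts_eq (S : Int) (N M : List Int) :
    ∀ (l : List Int), (∀ i ∈ l, 0 ≤ i ∧ i < S) → ∀ (b c : Int), 1 ≤ b →
      ((l.filter (fun i => decide (i = 0 ∨ PySem.List.pyGetD N i 0 ≠ PySem.List.pyGetD N (i - 1) 0
                          ∨ PySem.List.pyGetD M i 0 ≠ PySem.List.pyGetD M (i - 1) 0))).map
          (sizeSem S N M)).foldl stepA (b, c)
        = (l.map (sizeSem S N M)).foldl stepA (b, c) := by
  intro l
  induction l with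
  | nil => intro _ b c _; rfl
  | cons i t ih =>
    intro hmem b c hb
    obtain ⟨h0, hS⟩ := hmem i (List.mem_cons_self ..)
    have htail : ∀ j ∈ t, 0 ≤ j ∧ j < S := fun j hj => hmem j (List.mem_cons_of_mem i hj)
    by_cases hp : i = 0 ∨ PySem.List.pyGetD N i 0 ≠ PySem.List.pyGetD N (i - 1) 0
                        ∨ PySem.List.pyGetD M i 0 ≠ PySem.List.pyGetD M (i - 1) 0
    · rw [List.filter_cons_of_pos (by simpa using hp), List.map_cons, List.map_cons,
        List.foldl_cons, List.foldl_cons]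
      have hpos : 1 ≤ sizeSem S N M i := by
        apply sizeSem_pos S N M i hS
        rcases hp with h | h | h
        · exact Or.inl ((isStart_true_iff N i).mpr (Or.inl h))
        · exact Or.inl ((isStart_true_iff N i).mpr (Or.inr h))
        · exact Or.inr ((isStart_true_iff M i).mpr (Or.inr h))
      have hfst : 1 ≤ (stepA (b, c) (sizeSem S N M i)).1 := by
        unfold stepA; dsimp only []; split
        · dsimp only []; omega
        · split <;> dsimp only [] <;> omega
      exact ih htail _ _ hfst
    · rw [List.filter_cons_of_neg (by simpa using hp), List.map_cons, List.foldl_cons]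
      push_neg at hp
      have hz : sizeSem S N M i = 0 := by
        apply sizeSem_zero
        · rw [← Bool.not_eq_true, isStart_true_iff]; tauto
        · rw [← Bool.not_eq_true, isStart_true_iff]; tauto
      rw [hz, show stepA (b, c) 0 = (b, c) from by
        unfold stepA; rw [if_neg (by dsimp only []; omega), if_neg (by omega)]]
      exact ih htail b c hb

def trivInv (S : Int) (N : List Int) : CacheInv S N 0 0 :=
  ⟨le_rfl, fun _ h1 h2 => absurd (lt_of_le_of_lt h1 h2) (lt_irrefl 0),
   fun _ => (isStart_true_iff N 0).mpr (Or.inl rfl)⟩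

-- ===== VERDICT (by name: the statement is the Claim_ definition above) =====
theorem solve_spec : Claim_equal_solve := by
  intro S N M _ _
  unfold Spec_solve solve solve_alt
  by_cases hS : S ≤ 0
  · rw [if_pos hS, loopA, dif_neg (by omega)]
  · rw [if_neg hS]
    rw [loopA_eq S N M 0 0 0 0 0 le_rfl (trivInv S N) (trivInv S M)]
    dsimp only []
    rw [bfold_eq S N M _ (fun i hi => by
      rw [List.mem_filter, PySem.List.mem_pyRange_one] at hi; exact ⟨hi.1.1, hi.1.2⟩) (0, 0)]
    have hr : PySem.List.pyRange 0 S 1 = 0 :: PySem.List.pyRange 1 S 1 :=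
      PySem.List.pyRange_one_cons (by omega)
    have h00 : (0 : Int) = 0 ∨ PySem.List.pyGetD N 0 0 ≠ PySem.List.pyGetD N (0 - 1) 0
                          ∨ PySem.List.pyGetD M 0 0 ≠ PySem.List.pyGetD M (0 - 1) 0 := Or.inl rfl
    rw [hr, List.filter_cons_of_pos (by simp), List.map_cons, List.map_cons,
      List.foldl_cons, List.foldl_cons]
    have hpos : 1 ≤ sizeSem S N M 0 :=
      sizeSem_pos S N M 0 (by omega) (Or.inl ((isStart_true_iff N 0).mpr (Or.inl rfl)))
    rw [show stepA (0, 0) (sizeSem S N M 0) = (sizeSem S N M 0, 1) from by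
      unfold stepA; rw [if_pos (by dsimp only []; omega)]]
    exact (filter_starts_eq S N M (PySem.List.pyRange 1 S 1)
      (fun i hi => by rw [PySem.List.mem_pyRange_one] at hi; omega)
      (sizeSem S N M 0) 1 hpos).symm
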